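-- pv_equiv track=rewrite | github.com/rongachoka/Portal_ML_V4 | src/pipelines/archive/merge_inventory.py | has_critical_mismatch
-- ===== SOURCE A (Python) =====
-- CRITICAL_TYPES = [
--     {'deodorant', 'roll-on', 'stick', 'spray', 'mist'},
--     {'oil', 'serum', 'drops'},
--     {'shampoo', 'conditioner', 'mask'},
--     {'tablet', 'tab', 'capsule', 'cap', 'pill', 'softgel'},
--     {'syrup', 'suspension', 'liquid', 'solution'},
--     {'diaper', 'pant', 'nappy'},
--     {'wipe', 'tissue'},
--     {'gel', 'cream', 'lotion', 'moisturizer', 'balm'},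
--     {'scissors', 'clipper', 'cutter'},
--     {'floss', 'brush', 'paste'},
-- ]
--
-- def has_critical_mismatch(name_a, name_b):
--     set_a = set(name_a.split())
--     set_b = set(name_b.split())
--     type_a, type_b = None, None
--     for i, group in enumerate(CRITICAL_TYPES):
--         if not set_a.isdisjoint(group): type_a = i
--         if not set_b.isdisjoint(group): type_b = i
--     if type_a is not None and type_b is not None:
--         if type_a != type_b: return True
--     return False
-- ===== SOURCE B (Python) =====
-- WORD_TO_TYPE = {
--     'deodorant': 0, 'roll-on': 0, 'stick': 0, 'spray': 0, 'mist': 0,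
--     'oil': 1, 'serum': 1, 'drops': 1,
--     'shampoo': 2, 'conditioner': 2, 'mask': 2,
--     'tablet': 3, 'tab': 3, 'capsule': 3, 'cap': 3, 'pill': 3, 'softgel': 3,
--     'syrup': 4, 'suspension': 4, 'liquid': 4, 'solution': 4,
--     'diaper': 5, 'pant': 5, 'nappy': 5,
--     'wipe': 6, 'tissue': 6,
--     'gel': 7, 'cream': 7, 'lotion': 7, 'moisturizer': 7, 'balm': 7,
--     'scissors': 8, 'clipper': 8, 'cutter': 8,
--     'floss': 9, 'brush': 9, 'paste': 9,
-- }
--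
-- def _word_type(name):
--     # max group index over the name's recognized words (None if none match);
--     # each keyword belongs to exactly one group, so this equals the
--     # last-matching-group index.
--     t = None
--     for w in name.split():
--         i = WORD_TO_TYPE.get(w)
--         if i is not None:
--             t = i if t is None else max(t, i)
--     return t
--
-- def has_critical_mismatch(name_a, name_b):
--     ta = _word_type(name_a)
--     tb = _word_type(name_b)
--     return ta is not None and tb is not None and ta != tb
-- ===== Notes on version B (the rewrite author's own statement) =====
-- stated objective: idiomatic
-- what changed: Replaces the scan over the 10 keyword groups with set-intersection tests by a single pass over each name's words against a precomputed word-to-group dict, taking the max matching group index per name (equal to A's last-matching-group index since every keyword lies in exactly one group).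
import Mathlib
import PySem

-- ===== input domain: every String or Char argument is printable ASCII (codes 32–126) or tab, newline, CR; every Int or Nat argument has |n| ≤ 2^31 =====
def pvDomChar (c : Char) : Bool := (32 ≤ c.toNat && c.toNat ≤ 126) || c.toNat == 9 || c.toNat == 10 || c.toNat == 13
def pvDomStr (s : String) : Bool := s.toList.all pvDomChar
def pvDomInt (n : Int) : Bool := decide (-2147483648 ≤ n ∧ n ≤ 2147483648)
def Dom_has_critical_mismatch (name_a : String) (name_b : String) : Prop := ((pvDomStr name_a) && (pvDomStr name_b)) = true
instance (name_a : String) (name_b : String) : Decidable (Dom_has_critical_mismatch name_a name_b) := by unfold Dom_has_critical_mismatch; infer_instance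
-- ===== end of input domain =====

-- B replaces A's scan over the 10 keyword groups (set-intersection per group) by a single pass
-- over each name's words against a precomputed word-to-group dict, taking the max matching group
-- index (equal to A's last-matching-group index, as every keyword lies in exactly one group);
-- objective: more idiomatic, not claimed faster.

-- ===== PORT A =====
def CRITICAL_TYPES : List (PySem.Set String) :=
  [PySem.Set.ofList ["deodorant", "roll-on", "stick", "spray", "mist"],
   PySem.Set.ofList ["oil", "serum", "drops"],
   PySem.Set.ofList ["shampoo", "conditioner", "mask"],
   PySem.Set.ofList ["tablet", "tab", "capsule", "cap", "pill", "softgel"],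
   PySem.Set.ofList ["syrup", "suspension", "liquid", "solution"],
   PySem.Set.ofList ["diaper", "pant", "nappy"],
   PySem.Set.ofList ["wipe", "tissue"],
   PySem.Set.ofList ["gel", "cream", "lotion", "moisturizer", "balm"],
   PySem.Set.ofList ["scissors", "clipper", "cutter"],
   PySem.Set.ofList ["floss", "brush", "paste"]]

def has_critical_mismatch (name_a : String) (name_b : String) : Bool :=
  let set_a := PySem.Set.ofList (PySem.Str.split₀ name_a)
  let set_b := PySem.Set.ofList (PySem.Str.split₀ name_b)
  let tab :=
    (PySem.List.enumerate CRITICAL_TYPES).foldl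
      (fun (t : Option Int × Option Int) ig =>
        (if !(PySem.Set.isdisjoint set_a ig.2) then some ig.1 else t.1,
         if !(PySem.Set.isdisjoint set_b ig.2) then some ig.1 else t.2))
      (none, none)
  match tab.1, tab.2 with
  | some ta, some tb => if ta ≠ tb then true else false
  | _, _ => false

-- ===== PORT B =====
def WORD_TO_TYPE : PySem.Dict String Int :=
  PySem.Dict.mk [("deodorant", 0), ("roll-on", 0), ("stick", 0), ("spray", 0), ("mist", 0), ("oil", 1), ("serum", 1), ("drops", 1), ("shampoo", 2), ("conditioner", 2), ("mask", 2), ("tablet", 3), ("tab", 3), ("capsule", 3), ("cap", 3), ("pill", 3), ("softgel", 3), ("syrup", 4), ("suspension", 4), ("liquid", 4), ("solution", 4), ("diaper", 5), ("pant", 5), ("nappy", 5), ("wipe", 6), ("tissue", 6), ("gel", 7), ("cream", 7), ("lotion", 7), ("moisturizer", 7), ("balm", 7), ("scissors", 8), ("clipper", 8), ("cutter", 8), ("floss", 9), ("brush", 9), ("paste", 9)]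

def wordType (name : String) : Option Int :=
  (PySem.Str.split₀ name).foldl
    (fun t w =>
      match WORD_TO_TYPE.get? w with
      | some i => some (match t with | none => i | some j => max j i)
      | none => t)
    none

def has_critical_mismatch_alt (name_a : String) (name_b : String) : Bool :=
  match wordType name_a with
  | none => false
  | some ta =>
    match wordType name_b with
    | none => false
    | some tb => decide (ta ≠ tb)

-- ===== PRECONDITION & SPEC =====
def Spec_has_critical_mismatch (name_a : String) (name_b : String) (out : Bool) : Prop := out = has_critical_mismatch_alt name_a name_b
instance (name_a : String) (name_b : String) (out : Bool) : Decidable (Spec_has_critical_mismatch name_a name_b out) := by unfold Spec_has_critical_mismatch; infer_instance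

-- ===== CLAIM (what is proved, stated in full; the proofs are below) =====
def Claim_equal_has_critical_mismatch : Prop := ∀ (name_a : String) (name_b : String), Dom_has_critical_mismatch name_a name_b → Spec_has_critical_mismatch name_a name_b (has_critical_mismatch name_a name_b)

-- ===== LEMMAS AND PROOFS =====

lemma pv_tp_iff_mem (w : String) (j : Int) :
    WORD_TO_TYPE.get? w = some j ↔ (w, j) ∈ WORD_TO_TYPE.items :=
  PySem.Dict.get?_eq_some_iff_mem_items _ _ _ (by decide)

lemma pv_mem_g0 (w : String) : w ∈ (["deodorant", "roll-on", "stick", "spray", "mist"] : List String) ↔ WORD_TO_TYPE.get? w = some 0 := by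
  rw [pv_tp_iff_mem w 0]; simp [WORD_TO_TYPE]
lemma pv_mem_g1 (w : String) : w ∈ (["oil", "serum", "drops"] : List String) ↔ WORD_TO_TYPE.get? w = some 1 := by
  rw [pv_tp_iff_mem w 1]; simp [WORD_TO_TYPE]
lemma pv_mem_g2 (w : String) : w ∈ (["shampoo", "conditioner", "mask"] : List String) ↔ WORD_TO_TYPE.get? w = some 2 := by
  rw [pv_tp_iff_mem w 2]; simp [WORD_TO_TYPE]
lemma pv_mem_g3 (w : String) : w ∈ (["tablet", "tab", "capsule", "cap", "pill", "softgel"] : List String) ↔ WORD_TO_TYPE.get? w = some 3 := by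
  rw [pv_tp_iff_mem w 3]; simp [WORD_TO_TYPE]
lemma pv_mem_g4 (w : String) : w ∈ (["syrup", "suspension", "liquid", "solution"] : List String) ↔ WORD_TO_TYPE.get? w = some 4 := by
  rw [pv_tp_iff_mem w 4]; simp [WORD_TO_TYPE]
lemma pv_mem_g5 (w : String) : w ∈ (["diaper", "pant", "nappy"] : List String) ↔ WORD_TO_TYPE.get? w = some 5 := by
  rw [pv_tp_iff_mem w 5]; simp [WORD_TO_TYPE]
lemma pv_mem_g6 (w : String) : w ∈ (["wipe", "tissue"] : List String) ↔ WORD_TO_TYPE.get? w = some 6 := by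
  rw [pv_tp_iff_mem w 6]; simp [WORD_TO_TYPE]
lemma pv_mem_g7 (w : String) : w ∈ (["gel", "cream", "lotion", "moisturizer", "balm"] : List String) ↔ WORD_TO_TYPE.get? w = some 7 := by
  rw [pv_tp_iff_mem w 7]; simp [WORD_TO_TYPE]
lemma pv_mem_g8 (w : String) : w ∈ (["scissors", "clipper", "cutter"] : List String) ↔ WORD_TO_TYPE.get? w = some 8 := by
  rw [pv_tp_iff_mem w 8]; simp [WORD_TO_TYPE]
lemma pv_mem_g9 (w : String) : w ∈ (["floss", "brush", "paste"] : List String) ↔ WORD_TO_TYPE.get? w = some 9 := by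
  rw [pv_tp_iff_mem w 9]; simp [WORD_TO_TYPE]

lemma pv_tp_range (w : String) (j : Int) (h : WORD_TO_TYPE.get? w = some j) :
    0 ≤ j ∧ j ≤ 9 := by
  have hmem : j ∈ WORD_TO_TYPE.items.map Prod.snd :=
    List.mem_map_of_mem ((pv_tp_iff_mem w j).mp h)
  simp [WORD_TO_TYPE] at hmem
  rcases hmem with h|h|h|h|h|h|h|h|h|h <;> omega

lemma pv_cond_iff (ws : List String) (g : List String) (j : Int)
    (hg : ∀ w, w ∈ g ↔ WORD_TO_TYPE.get? w = some j) :
    (((!PySem.Set.isdisjoint (PySem.Set.ofList ws) (PySem.Set.ofList g)) = true)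
      ↔ j ∈ ws.filterMap (fun w => WORD_TO_TYPE.get? w)) := by
  rw [Bool.not_eq_true', ← Bool.not_eq_true, PySem.Set.isdisjoint_iff]
  push Not
  simp only [PySem.Set.mem_ofList, List.mem_filterMap]
  constructor
  · rintro ⟨x, hx, hxg⟩
    exact ⟨x, hx, (hg x).mp hxg⟩
  · rintro ⟨x, hx, hxj⟩
    exact ⟨x, hx, (hg x).mpr hxj⟩

lemma pv_chain_eq_max? (L : List Int) (hr : ∀ i ∈ L, 0 ≤ i ∧ i ≤ 9) :
    (if (9:Int) ∈ L then some (9:Int) else (if (8:Int) ∈ L then some (8:Int) else (if (7:Int) ∈ L then some (7:Int) else (if (6:Int) ∈ L then some (6:Int) else (if (5:Int) ∈ L then some (5:Int) else (if (4:Int) ∈ L then some (4:Int) else (if (3:Int) ∈ L then some (3:Int) else (if (2:Int) ∈ L then some (2:Int) else (if (1:Int) ∈ L then some (1:Int) else (if (0:Int) ∈ L then some (0:Int) else none)))))))))) = L.max? := by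
  cases hL : L.max? with
  | none =>
    have : L = [] := List.max?_eq_none_iff.mp hL
    subst this; simp
  | some m =>
    obtain ⟨hm, hle⟩ := List.max?_eq_some_iff.mp hL
    have hgt : ∀ j : Int, m < j → j ∉ L := fun j hj hmem => absurd (hle j hmem) (by omega)
    obtain ⟨h0, h9⟩ := hr m hm
    interval_cases m
    · rw [if_neg (hgt 9 (by omega)), if_neg (hgt 8 (by omega)), if_neg (hgt 7 (by omega)), if_neg (hgt 6 (by omega)), if_neg (hgt 5 (by omega)), if_neg (hgt 4 (by omega)), if_neg (hgt 3 (by omega)), if_neg (hgt 2 (by omega)), if_neg (hgt 1 (by omega)), if_pos hm]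
    · rw [if_neg (hgt 9 (by omega)), if_neg (hgt 8 (by omega)), if_neg (hgt 7 (by omega)), if_neg (hgt 6 (by omega)), if_neg (hgt 5 (by omega)), if_neg (hgt 4 (by omega)), if_neg (hgt 3 (by omega)), if_neg (hgt 2 (by omega)), if_pos hm]
    · rw [if_neg (hgt 9 (by omega)), if_neg (hgt 8 (by omega)), if_neg (hgt 7 (by omega)), if_neg (hgt 6 (by omega)), if_neg (hgt 5 (by omega)), if_neg (hgt 4 (by omega)), if_neg (hgt 3 (by omega)), if_pos hm]
    · rw [if_neg (hgt 9 (by omega)), if_neg (hgt 8 (by omega)), if_neg (hgt 7 (by omega)), if_neg (hgt 6 (by omega)), if_neg (hgt 5 (by omega)), if_neg (hgt 4 (by omega)), if_pos hm]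
    · rw [if_neg (hgt 9 (by omega)), if_neg (hgt 8 (by omega)), if_neg (hgt 7 (by omega)), if_neg (hgt 6 (by omega)), if_neg (hgt 5 (by omega)), if_pos hm]
    · rw [if_neg (hgt 9 (by omega)), if_neg (hgt 8 (by omega)), if_neg (hgt 7 (by omega)), if_neg (hgt 6 (by omega)), if_pos hm]
    · rw [if_neg (hgt 9 (by omega)), if_neg (hgt 8 (by omega)), if_neg (hgt 7 (by omega)), if_pos hm]
    · rw [if_neg (hgt 9 (by omega)), if_neg (hgt 8 (by omega)), if_pos hm]
    · rw [if_neg (hgt 9 (by omega)), if_pos hm]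
    · rw [if_pos hm]

lemma pv_foldW_some : ∀ (ws : List String) (a : Int),
    ws.foldl (fun t w =>
      match WORD_TO_TYPE.get? w with
      | some i => some (match t with | none => i | some j => max j i)
      | none => t) (some a)
      = some (List.foldl max a (ws.filterMap (fun w => WORD_TO_TYPE.get? w))) := by
  intro ws
  induction ws with
  | nil => intro a; rfl
  | cons w ws ih =>
    intro a
    cases h : WORD_TO_TYPE.get? w with
    | none => simp only [List.foldl_cons, List.filterMap_cons, h, ih]
    | some i => simp only [List.foldl_cons, List.filterMap_cons, h, ih]

lemma pv_wordType_eq_max? (name : String) :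
    wordType name = ((PySem.Str.split₀ name).filterMap (fun w => WORD_TO_TYPE.get? w)).max? := by
  unfold wordType
  generalize PySem.Str.split₀ name = ws
  induction ws with
  | nil => rfl
  | cons w ws ih =>
    simp only [List.foldl_cons, List.filterMap_cons]
    cases h : WORD_TO_TYPE.get? w with
    | none => exact ih
    | some i => simp only [pv_foldW_some, List.max?_cons']

lemma pv_typeA_eq (ws : List String) :
    (PySem.List.enumerate CRITICAL_TYPES).foldl
      (fun (t : Option Int) ig =>
        if !(PySem.Set.isdisjoint (PySem.Set.ofList ws) ig.2) then some ig.1 else t) none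
    = (ws.filterMap (fun w => WORD_TO_TYPE.get? w)).max? := by
  have c0 := pv_cond_iff ws ["deodorant", "roll-on", "stick", "spray", "mist"] 0 (pv_mem_g0)
  have c1 := pv_cond_iff ws ["oil", "serum", "drops"] 1 (pv_mem_g1)
  have c2 := pv_cond_iff ws ["shampoo", "conditioner", "mask"] 2 (pv_mem_g2)
  have c3 := pv_cond_iff ws ["tablet", "tab", "capsule", "cap", "pill", "softgel"] 3 (pv_mem_g3)
  have c4 := pv_cond_iff ws ["syrup", "suspension", "liquid", "solution"] 4 (pv_mem_g4)
  have c5 := pv_cond_iff ws ["diaper", "pant", "nappy"] 5 (pv_mem_g5)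
  have c6 := pv_cond_iff ws ["wipe", "tissue"] 6 (pv_mem_g6)
  have c7 := pv_cond_iff ws ["gel", "cream", "lotion", "moisturizer", "balm"] 7 (pv_mem_g7)
  have c8 := pv_cond_iff ws ["scissors", "clipper", "cutter"] 8 (pv_mem_g8)
  have c9 := pv_cond_iff ws ["floss", "brush", "paste"] 9 (pv_mem_g9)
  rw [show PySem.List.enumerate CRITICAL_TYPES = [((0:Int), PySem.Set.ofList ["deodorant", "roll-on", "stick", "spray", "mist"]), ((1:Int), PySem.Set.ofList ["oil", "serum", "drops"]), ((2:Int), PySem.Set.ofList ["shampoo", "conditioner", "mask"]), ((3:Int), PySem.Set.ofList ["tablet", "tab", "capsule", "cap", "pill", "softgel"]), ((4:Int), PySem.Set.ofList ["syrup", "suspension", "liquid", "solution"]), ((5:Int), PySem.Set.ofList ["diaper", "pant", "nappy"]), ((6:Int), PySem.Set.ofList ["wipe", "tissue"]), ((7:Int), PySem.Set.ofList ["gel", "cream", "lotion", "moisturizer", "balm"]), ((8:Int), PySem.Set.ofList ["scissors", "clipper", "cutter"]), ((9:Int), PySem.Set.ofList ["floss", "brush", "paste"])] from rfl]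
  simp only [List.foldl_cons, List.foldl_nil]
  simp only [c0, c1, c2, c3, c4, c5, c6, c7, c8, c9]
  exact pv_chain_eq_max? _ (fun i hi => by
    obtain ⟨x, _, hx⟩ := List.mem_filterMap.mp hi
    exact pv_tp_range x i hx)

-- ===== VERDICT (by name: the statement is the Claim_ definition above) =====
theorem has_critical_mismatch_spec : Claim_equal_has_critical_mismatch := by
  intro a b _
  simp only [Spec_has_critical_mismatch, has_critical_mismatch]
  rw [PySem.List.foldl_prod_mk
    (fun (u : Option Int) (ig : Int × PySem.Set String) =>
      if !(PySem.Set.isdisjoint (PySem.Set.ofList (PySem.Str.split₀ a)) ig.2) then some ig.1 else u)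
    (fun (u : Option Int) (ig : Int × PySem.Set String) =>
      if !(PySem.Set.isdisjoint (PySem.Set.ofList (PySem.Str.split₀ b)) ig.2) then some ig.1 else u)
    (PySem.List.enumerate CRITICAL_TYPES) none none]
  rw [pv_typeA_eq, pv_typeA_eq]
  simp only [has_critical_mismatch_alt]
  rw [pv_wordType_eq_max? a, pv_wordType_eq_max? b]
  cases ((PySem.Str.split₀ a).filterMap (fun w => WORD_TO_TYPE.get? w)).max? with
  | none => rfl
  | some ta =>
    cases ((PySem.Str.split₀ b).filterMap (fun w => WORD_TO_TYPE.get? w)).max? with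
    | none => rfl
    | some tb => by_cases h : ta = tb <;> simp [h]
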